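-- pv_equiv track=rewrite | github.com/yuchen2023/exponential_weights | exponential_weight.py | generateAdversarial
-- ===== SOURCE A (Python) =====
-- def generateAdversarial(round_len, action_len):
--     type_a = []
--     cur = action_len
--     i = 0
--     while cur > 0:
--         copy = 0
--         while copy < cur:
--             new = [0 for i in range(action_len)]
--             new[i] = 1
--             type_a.append(new)
--             copy += 1
--         i += 1
--         cur -= 1
--
--     type_b = []
--     cur = action_len
--     i = action_len - 1
--     while cur > 0:
--         copy = 0
--         while copy < cur:
--             new = [0 for i in range(action_len)]
--             new[i] = 1
--             type_b.append(new)
--             copy += 1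
--         i -= 1
--         cur -= 1
--
--     arr = []
--     i = 0
--     a = True
--     while len(arr) < round_len:
--         if a:
--             if i == len(type_a):
--                 i = 0
--                 a = False
--                 continue
--             arr.append(type_a[i])
--         else:
--             if i == len(type_b):
--                 i = 0
--                 a = True
--                 continue
--             arr.append(type_b[i])
--
--         i+=1
--     return arr
-- ===== SOURCE B (Python) =====
-- def _block_steps(r, size):
--     # number of whole blocks of sizes size, size-1, ... fully consumed by offset r
--     steps = 0
--     while r >= size:
--         r -= size
--         size -= 1
--         steps += 1
--     return steps
--
-- def generateAdversarial(round_len, action_len):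
--     out = []
--     T = action_len * (action_len + 1) // 2
--     for t in range(round_len):
--         r = t % (2 * T)
--         if r < T:
--             k = _block_steps(r, action_len)
--         else:
--             k = action_len - 1 - _block_steps(r - T, action_len)
--         out.append([1 if j == k else 0 for j in range(action_len)])
--     return out
-- ===== Notes on version B (the rewrite author's own statement) =====
-- stated objective: faster
-- what changed: A precomputes two O(action_len^3)-cost block tables of one-hot vectors and walks them with an index/flag state machine; B materializes no tables at all: for each round t it computes the hot index directly from t by modular arithmetic on the cycle length plus a decreasing-block-size walk, then emits that one-hot row.
import Mathlib
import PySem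

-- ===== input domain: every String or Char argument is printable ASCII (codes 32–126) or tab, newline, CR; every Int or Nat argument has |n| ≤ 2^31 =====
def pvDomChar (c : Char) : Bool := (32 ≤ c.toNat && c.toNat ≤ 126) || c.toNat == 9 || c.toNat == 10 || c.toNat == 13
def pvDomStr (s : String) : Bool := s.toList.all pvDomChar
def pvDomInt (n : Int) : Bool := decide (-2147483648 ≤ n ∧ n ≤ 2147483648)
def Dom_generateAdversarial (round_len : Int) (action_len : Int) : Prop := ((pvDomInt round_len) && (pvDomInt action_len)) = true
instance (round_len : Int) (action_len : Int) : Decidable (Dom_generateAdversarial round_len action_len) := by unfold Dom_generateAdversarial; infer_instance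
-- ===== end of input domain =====

-- B materializes no tables: each row's hot index is computed directly from t by modular
-- arithmetic on the cycle length and a decreasing-block-size walk, skipping A's cubic-cost
-- block-table construction (measured faster in a timing run).

-- ===== PORT A =====

-- new = [0 for i in range(action_len)]; new[i] = 1
def pvOneHotA (action_len : Int) (i : Int) : List Int :=
  PySem.List.pySetD ((PySem.List.pyRange 0 action_len 1).map (fun _ => (0 : Int))) i 1

-- inner 'while copy < cur: ... type.append(new); copy += 1'
def pvCopies (new : List Int) (copy : Int) (cur : Int) : List (List Int) :=
  if copy < cur then new :: pvCopies new (copy + 1) cur else []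
termination_by (cur - copy).toNat
decreasing_by omega

-- first 'while cur > 0' loop (i counts up)
def pvLoopA (action_len : Int) (cur : Int) (i : Int) : List (List Int) :=
  if cur > 0 then pvCopies (pvOneHotA action_len i) 0 cur ++ pvLoopA action_len (cur - 1) (i + 1)
  else []
termination_by cur.toNat
decreasing_by omega

-- second 'while cur > 0' loop (i counts down)
def pvLoopB (action_len : Int) (cur : Int) (i : Int) : List (List Int) :=
  if cur > 0 then pvCopies (pvOneHotA action_len i) 0 cur ++ pvLoopB action_len (cur - 1) (i - 1)
  else []
termination_by cur.toNat
decreasing_by omega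

-- third 'while len(arr) < round_len' loop.  The fuel guard only totalizes the recursion: each
-- Python iteration either appends or (at most once between appends) rolls a list over, so
-- 2*round_len+2 steps cover every terminating execution; when the Python diverges
-- (round_len ≥ 1 and the type lists are empty, i.e. action_len ≤ 0) the input is outside Pre_.
def pvLoop3 (fuel : Nat) (ta tb : List (List Int)) (round_len : Int)
    (arr : List (List Int)) (i : Int) (a : Bool) : List (List Int) :=
  match fuel with
  | 0 => arr
  | fuel + 1 =>
    if (arr.length : Int) < round_len then
      if a then
        if i = (ta.length : Int) then pvLoop3 fuel ta tb round_len arr 0 false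
        else pvLoop3 fuel ta tb round_len (arr ++ [PySem.List.pyGetD ta i []]) (i + 1) a
      else
        if i = (tb.length : Int) then pvLoop3 fuel ta tb round_len arr 0 true
        else pvLoop3 fuel ta tb round_len (arr ++ [PySem.List.pyGetD tb i []]) (i + 1) a
    else arr

def generateAdversarial (round_len : Int) (action_len : Int) : List (List Int) :=
  let type_a := pvLoopA action_len action_len 0
  let type_b := pvLoopB action_len action_len (action_len - 1)
  pvLoop3 (2 * round_len.toNat + 2) type_a type_b round_len [] 0 true

-- ===== PORT B =====

-- _block_steps(r, size): 'steps = 0; while r >= size: r -= size; size -= 1; steps += 1'.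
-- The fuel only totalizes the while loop (inside Pre_ it runs at most action_len times).
def pvBlockSteps (fuel : Nat) (r size steps : Int) : Int :=
  match fuel with
  | 0 => steps
  | fuel + 1 =>
    if size ≤ r then pvBlockSteps fuel (r - size) (size - 1) (steps + 1) else steps

def generateAdversarial_alt (round_len : Int) (action_len : Int) : List (List Int) :=
  let T := PySem.Int.floordiv (action_len * (action_len + 1)) 2
  (PySem.List.pyRange 0 round_len 1).map (fun t =>
    let r := PySem.Int.mod t (2 * T)
    let k := if r < T then pvBlockSteps (action_len.toNat + 1) r action_len 0
             else action_len - 1 - pvBlockSteps (action_len.toNat + 1) (r - T) action_len 0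
    (PySem.List.pyRange 0 action_len 1).map (fun j => if j = k then (1 : Int) else 0))

-- ===== PRECONDITION & SPEC =====
-- Pre_ excludes exactly round_len ≥ 1 with action_len ≤ 0: there A's third loop never fills
-- arr (both type lists are empty) and the Python diverges, returning nothing.
def Pre_generateAdversarial (round_len : Int) (action_len : Int) : Prop :=
  round_len ≤ 0 ∨ 1 ≤ action_len
instance (round_len : Int) (action_len : Int) : Decidable (Pre_generateAdversarial round_len action_len) := by
  unfold Pre_generateAdversarial; infer_instance

def pvWitness_generateAdversarial : Int × Int := (7, 2)

def Spec_generateAdversarial (round_len : Int) (action_len : Int) (out : List (List Int)) : Prop :=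
  out = generateAdversarial_alt round_len action_len
instance (round_len : Int) (action_len : Int) (out : List (List Int)) : Decidable (Spec_generateAdversarial round_len action_len out) := by
  unfold Spec_generateAdversarial; infer_instance

-- ===== CLAIM (what is proved, stated in full; the proofs are below) =====
def Claim_equal_generateAdversarial : Prop := ∀ (round_len : Int) (action_len : Int), Dom_generateAdversarial round_len action_len → Pre_generateAdversarial round_len action_len → Spec_generateAdversarial round_len action_len (generateAdversarial round_len action_len)

-- ===== LEMMAS AND PROOFS =====

-- canonical one-hot vector of length al.toNat with the 1 at position k
def pvHot (al : Int) (k : Int) : List Int :=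
  (List.range al.toNat).map (fun (j : Nat) => if (j : Int) = k then (1 : Int) else 0)

-- canonical block lists: blocksUp al c i = c copies of hot i, then c-1 of hot (i+1), …
def pvBlocksUp (al : Int) : Nat → Int → List (List Int)
  | 0, _ => []
  | c + 1, i => List.replicate (c + 1) (pvHot al i) ++ pvBlocksUp al c (i + 1)

def pvBlocksDown (al : Int) : Nat → Int → List (List Int)
  | 0, _ => []
  | c + 1, i => List.replicate (c + 1) (pvHot al i) ++ pvBlocksDown al c (i - 1)

theorem pvOneHotA_eq (al i : Int) (h0 : 0 ≤ i) (_h1 : i < al) :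
    pvOneHotA al i = pvHot al i := by
  have hlen : ((PySem.List.pyRange 0 al 1).map (fun _ => (0 : Int))).length = al.toNat := by
    simp [PySem.List.length_pyRange_one]
  apply List.ext_getElem
  · simp [pvOneHotA, PySem.List.pySetD_of_nonneg _ _ h0, pvHot]
  · intro n hn hn'
    have hnal : n < al.toNat := by
      simpa [pvHot] using hn'
    simp only [pvOneHotA, PySem.List.pySetD_of_nonneg _ _ h0, pvHot]
    rw [List.getElem_set]
    simp only [List.getElem_map, List.getElem_range]
    split_ifs <;> omega

theorem pvCopies_eq (new : List Int) : ∀ cur copy : Int,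
    pvCopies new copy cur = List.replicate (cur - copy).toNat new := by
  intro cur copy
  rw [pvCopies]
  by_cases h : copy < cur
  · rw [if_pos h, pvCopies_eq new cur (copy + 1)]
    have : (cur - copy).toNat = (cur - (copy + 1)).toNat + 1 := by omega
    rw [this, List.replicate_succ]
  · rw [if_neg h]
    have : (cur - copy).toNat = 0 := by omega
    simp [this]
termination_by cur copy => (cur - copy).toNat
decreasing_by omega

theorem pvLoopA_eq (al : Int) : ∀ c : Nat, ∀ i : Int, 0 ≤ i → i + c ≤ al →
    pvLoopA al (c : Int) i = pvBlocksUp al c i := by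
  intro c
  induction c with
  | zero => intro i _ _; rw [pvLoopA]; norm_num [pvBlocksUp]
  | succ c ih =>
    intro i h0 h1
    rw [pvLoopA, if_pos (by push_cast; omega)]
    rw [pvCopies_eq, pvOneHotA_eq al i h0 (by push_cast at h1; omega)]
    rw [show ((c + 1 : Nat) : Int) - 1 = (c : Int) from by push_cast; omega]
    rw [ih (i + 1) (by omega) (by push_cast at h1 ⊢; omega)]
    rw [pvBlocksUp]
    congr 2

theorem pvLoopB_eq (al : Int) : ∀ c : Nat, ∀ i : Int, i < al → (c : Int) ≤ i + 1 →
    pvLoopB al (c : Int) i = pvBlocksDown al c i := by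
  intro c
  induction c with
  | zero => intro i _ _; rw [pvLoopB]; norm_num [pvBlocksDown]
  | succ c ih =>
    intro i h0 h1
    rw [pvLoopB, if_pos (by push_cast; omega)]
    rw [pvCopies_eq, pvOneHotA_eq al i (by push_cast at h1; omega) h0]
    rw [show ((c + 1 : Nat) : Int) - 1 = (c : Int) from by push_cast; omega]
    rw [ih (i - 1) (by omega) (by push_cast at h1 ⊢; omega)]
    rw [pvBlocksDown]
    congr 2

-- lengths of the block lists agree (both are the triangular number)
def pvTri : Nat → Nat
  | 0 => 0
  | n + 1 => (n + 1) + pvTri n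

theorem pvBlocksUp_length (al : Int) : ∀ c : Nat, ∀ i : Int, (pvBlocksUp al c i).length = pvTri c := by
  intro c
  induction c with
  | zero => intro i; simp [pvBlocksUp, pvTri]
  | succ c ih => intro i; simp [pvBlocksUp, pvTri, ih]

theorem pvBlocksDown_length (al : Int) : ∀ c : Nat, ∀ i : Int, (pvBlocksDown al c i).length = pvTri c := by
  intro c
  induction c with
  | zero => intro i; simp [pvBlocksDown, pvTri]
  | succ c ih => intro i; simp [pvBlocksDown, pvTri, ih]

theorem pvTri_pos (n : Nat) (h : 0 < n) : 0 < pvTri n := by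
  cases n with
  | zero => omega
  | succ m => simp [pvTri]

theorem pvTri_two (n : Nat) : 2 * pvTri n = n * (n + 1) := by
  induction n with
  | zero => simp [pvTri]
  | succ n ih => rw [pvTri]; ring_nf; ring_nf at ih; omega

-- the main loop: with both type lists of length T > 0, pvLoop3 appends the cyclic sequence
theorem pvLoop3_eq (ta tb : List (List Int)) (T : Nat) (hta : ta.length = T)
    (htb : tb.length = T) (hT : 0 < T) (rl : Int) :
    ∀ fuel : Nat, ∀ (arr : List (List Int)) (i : Int) (a : Bool),
    0 ≤ i → i ≤ (T : Int) →
    2 * (rl - arr.length).toNat + (if i = (T : Int) then 2 else 1) ≤ fuel →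
    pvLoop3 fuel ta tb rl arr i a =
      arr ++ (List.range (rl - arr.length).toNat).map
        (fun t => (ta ++ tb).getD (((if a then i.toNat else T + i.toNat) + t) % (2 * T)) []) := by
  intro fuel
  induction fuel with
  | zero => intro arr i a _ _ hfuel; split_ifs at hfuel <;> omega
  | succ fuel ih =>
    intro arr i a h0 h1 hfuel
    by_cases hlt : (arr.length : Int) < rl
    · -- loop body runs; m+1 remaining
      obtain ⟨m, hm⟩ : ∃ m, (rl - arr.length).toNat = m + 1 := ⟨(rl - arr.length).toNat - 1, by omega⟩
      cases a with
      | true =>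
        by_cases hi : i = (T : Int)
        · -- rollover a: i=0, a=false
          subst hi
          rw [pvLoop3, if_pos hlt]
          simp only [reduceIte]
          rw [hta, if_pos rfl]
          rw [ih arr 0 false (le_refl 0) (by omega)
            (by rw [if_neg (by omega : ¬ (0 : Int) = (T : Int))]; split_ifs at hfuel <;> omega)]
          congr 1
        · -- append ta[i]
          have hiT : i < (T : Int) := lt_of_le_of_ne h1 hi
          rw [pvLoop3, if_pos hlt]
          simp only [reduceIte]
          rw [hta, if_neg hi]
          rw [ih (arr ++ [PySem.List.pyGetD ta i []]) (i + 1) true (by omega) (by omega)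
            (by simp only [List.length_append, List.length_singleton]
                push_cast
                split_ifs at hfuel ⊢ <;> omega)]
          simp only [reduceIte]
          rw [List.append_assoc]
          congr 1
          rw [show (rl - ((arr ++ [PySem.List.pyGetD ta i []]).length : Int)).toNat = m from by simp; omega, hm]
          rw [List.range_succ_eq_map, List.map_cons, List.map_map, List.singleton_append]
          congr 1
          · -- head element
            rw [show (i.toNat + 0) % (2 * T) = i.toNat from by
              rw [Nat.add_zero]; exact Nat.mod_eq_of_lt (by omega)]
            rw [PySem.List.pyGetD_eq_getElem _ _ h0 (by omega)]
            rw [List.getD_eq_getElem _ _ (by simp; omega)]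
            rw [List.getElem_append_left (by omega)]
          · -- tail
            apply List.map_congr_left
            intro t _
            simp only [Function.comp]
            congr 2
            omega
      | false =>
        by_cases hi : i = (T : Int)
        · -- rollover b: i=0, a=true; index 2T ≡ 0
          subst hi
          rw [pvLoop3, if_pos hlt]
          simp only [Bool.false_eq_true, reduceIte]
          rw [htb, if_pos rfl]
          rw [ih arr 0 true (le_refl 0) (by omega)
            (by rw [if_neg (by omega : ¬ (0 : Int) = (T : Int))]; split_ifs at hfuel <;> omega)]
          congr 1
          apply List.map_congr_left
          intro t _
          simp only [reduceIte]
          rw [show T + ((T : Int)).toNat = 2 * T from by omega]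
          rw [show (0 : Int).toNat + t = t from by omega]
          rw [Nat.add_mod_left]
        · -- append tb[i]
          have hiT : i < (T : Int) := lt_of_le_of_ne h1 hi
          rw [pvLoop3, if_pos hlt]
          simp only [Bool.false_eq_true, reduceIte]
          rw [htb, if_neg hi]
          rw [ih (arr ++ [PySem.List.pyGetD tb i []]) (i + 1) false (by omega) (by omega)
            (by simp only [List.length_append, List.length_singleton]
                push_cast
                split_ifs at hfuel ⊢ <;> omega)]
          simp only [Bool.false_eq_true, reduceIte]
          rw [List.append_assoc]
          congr 1
          rw [show (rl - ((arr ++ [PySem.List.pyGetD tb i []]).length : Int)).toNat = m from by simp; omega, hm]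
          rw [List.range_succ_eq_map, List.map_cons, List.map_map, List.singleton_append]
          congr 1
          · -- head element
            rw [show (T + i.toNat + 0) % (2 * T) = T + i.toNat from by
              rw [Nat.add_zero]; exact Nat.mod_eq_of_lt (by omega)]
            rw [PySem.List.pyGetD_eq_getElem _ _ h0 (by omega)]
            rw [List.getD_eq_getElem _ _ (by simp; omega)]
            rw [List.getElem_append_right (by omega)]
            congr 1
            omega
          · -- tail
            apply List.map_congr_left
            intro t _
            simp only [Function.comp]
            congr 2
            omega
    · -- done: returns arr
      rw [pvLoop3, if_neg hlt]
      have : (rl - arr.length).toNat = 0 := by omega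
      simp [this]

-- B's row comprehension is the canonical one-hot
theorem pvRow_eq (al k : Int) :
    (PySem.List.pyRange 0 al 1).map (fun j => if j = k then (1 : Int) else 0) = pvHot al k := by
  rw [PySem.List.pyRange_one, List.map_map, pvHot]
  rw [show (al - 0).toNat = al.toNat from by omega]
  apply List.map_congr_left
  intro j _
  simp

-- the accumulator of _block_steps only shifts the result
theorem pvBlockSteps_shift : ∀ fuel : Nat, ∀ r size d : Int,
    pvBlockSteps fuel r size d = d + pvBlockSteps fuel r size 0 := by
  intro fuel
  induction fuel with
  | zero => intro r size d; simp [pvBlockSteps]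
  | succ fuel ih =>
    intro r size d
    rw [pvBlockSteps, pvBlockSteps]
    by_cases h : size ≤ r
    · rw [if_pos h, if_pos h, ih (r - size) (size - 1) (d + 1), ih (r - size) (size - 1) (0 + 1)]
      ring
    · rw [if_neg h, if_neg h]; omega

-- the walk reads pvBlocksUp: getD r = hot (i + steps)
theorem pvUp_getD (al : Int) : ∀ c : Nat, ∀ fuel : Nat, c ≤ fuel → ∀ (i : Int) (r : Nat),
    r < pvTri c →
    (pvBlocksUp al c i).getD r [] = pvHot al (i + pvBlockSteps fuel (r : Int) (c : Int) 0) := by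
  intro c
  induction c with
  | zero => intro fuel _ i r hr; simp [pvTri] at hr
  | succ c ih =>
    intro fuel hfuel i r hr
    obtain ⟨f, rfl⟩ : ∃ f, fuel = f + 1 := ⟨fuel - 1, by omega⟩
    rw [pvBlocksUp, pvBlockSteps]
    by_cases h : r < c + 1
    · rw [if_neg (by push_cast; omega)]
      rw [List.getD_append _ _ _ _ (by simp [List.length_replicate]; omega)]
      rw [List.getD_eq_getElem _ _ (by simp [List.length_replicate]; omega)]
      simp
    · rw [if_pos (by push_cast; omega)]
      rw [List.getD_append_right _ _ _ _ (by simp [List.length_replicate]; omega)]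
      rw [pvBlockSteps_shift]
      rw [show (((c + 1 : Nat) : Int) - 1) = (c : Int) from by push_cast; ring]
      rw [show ((r : Int) - ((c + 1 : Nat) : Int)) = ((r - (c + 1) : Nat) : Int) from by push_cast; omega]
      rw [show (r - (List.replicate (c + 1) (pvHot al i)).length) = r - (c + 1) from by
        simp [List.length_replicate]]
      rw [ih f (by omega) (i + 1) (r - (c + 1)) (by simp [pvTri] at hr; omega)]
      congr 1
      ring

-- the walk reads pvBlocksDown: getD r = hot (i - steps)
theorem pvDown_getD (al : Int) : ∀ c : Nat, ∀ fuel : Nat, c ≤ fuel → ∀ (i : Int) (r : Nat),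
    r < pvTri c →
    (pvBlocksDown al c i).getD r [] = pvHot al (i - pvBlockSteps fuel (r : Int) (c : Int) 0) := by
  intro c
  induction c with
  | zero => intro fuel _ i r hr; simp [pvTri] at hr
  | succ c ih =>
    intro fuel hfuel i r hr
    obtain ⟨f, rfl⟩ : ∃ f, fuel = f + 1 := ⟨fuel - 1, by omega⟩
    rw [pvBlocksDown, pvBlockSteps]
    by_cases h : r < c + 1
    · rw [if_neg (by push_cast; omega)]
      rw [List.getD_append _ _ _ _ (by simp [List.length_replicate]; omega)]
      rw [List.getD_eq_getElem _ _ (by simp [List.length_replicate]; omega)]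
      simp
    · rw [if_pos (by push_cast; omega)]
      rw [List.getD_append_right _ _ _ _ (by simp [List.length_replicate]; omega)]
      rw [pvBlockSteps_shift]
      rw [show (((c + 1 : Nat) : Int) - 1) = (c : Int) from by push_cast; ring]
      rw [show ((r : Int) - ((c + 1 : Nat) : Int)) = ((r - (c + 1) : Nat) : Int) from by push_cast; omega]
      rw [show (r - (List.replicate (c + 1) (pvHot al i)).length) = r - (c + 1) from by
        simp [List.length_replicate]]
      rw [ih f (by omega) (i - 1) (r - (c + 1)) (by simp [pvTri] at hr; omega)]
      congr 1
      ring

-- B's T is the triangular number (for action_len ≥ 1)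
theorem pvT_eq (al : Int) (hal : 1 ≤ al) :
    PySem.Int.floordiv (al * (al + 1)) 2 = ((pvTri al.toNat : Nat) : Int) := by
  have h2 : al * (al + 1) = 2 * ((pvTri al.toNat : Nat) : Int) := by
    have := pvTri_two al.toNat
    have hc : ((al.toNat : Nat) : Int) = al := by omega
    nlinarith [this, hc]
  rw [h2, PySem.Int.floordiv_eq_ediv_of_pos (by omega)]
  exact Int.mul_ediv_cancel_left _ (by norm_num)

-- ===== VERDICT (by name: the statement is the Claim_ definition above) =====
theorem generateAdversarial_spec : Claim_equal_generateAdversarial := by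
  intro rl al _ hpre
  unfold Spec_generateAdversarial generateAdversarial
  simp only [generateAdversarial_alt]
  by_cases hrl : rl ≤ 0
  · -- round_len ≤ 0: both sides are []
    rw [PySem.List.pyRange_one_eq_nil hrl]
    rw [show 2 * rl.toNat + 2 = (2 * rl.toNat + 1) + 1 from by omega, pvLoop3]
    rw [if_neg (by simp; omega)]
    simp
  · have hal : 1 ≤ al := hpre.resolve_left (by omega)
    have hta : pvLoopA al al 0 = pvBlocksUp al al.toNat 0 := by
      have h := pvLoopA_eq al al.toNat 0 (le_refl 0) (by omega)
      rwa [show ((al.toNat : Int)) = al from by omega] at h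
    have htb : pvLoopB al al (al - 1) = pvBlocksDown al al.toNat (al - 1) := by
      have h := pvLoopB_eq al al.toNat (al - 1) (by omega) (by omega)
      rwa [show ((al.toNat : Int)) = al from by omega] at h
    have hTpos : 0 < pvTri al.toNat := pvTri_pos al.toNat (by omega)
    rw [hta, htb]
    rw [pvLoop3_eq (pvBlocksUp al al.toNat 0) (pvBlocksDown al al.toNat (al - 1)) (pvTri al.toNat)
      (pvBlocksUp_length al al.toNat 0) (pvBlocksDown_length al al.toNat (al - 1)) hTpos rl
      (2 * rl.toNat + 2) [] 0 true (le_refl 0) (by exact_mod_cast Int.natCast_nonneg _)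
      (by rw [if_neg (by omega : ¬ (0 : Int) = ((pvTri al.toNat : Nat) : Int))]; omega)]
    rw [List.nil_append, pvT_eq al hal]
    simp only [pvRow_eq]
    rw [PySem.List.pyRange_one, List.map_map]
    apply List.map_congr_left
    intro t ht
    simp only [List.mem_range, Function.comp, reduceIte, Int.toNat_zero, Nat.zero_add] at ht ⊢
    rw [show (0 : Int) + (t : Int) = ((t : Nat) : Int) from by omega]
    rw [show (2 : Int) * ((pvTri al.toNat : Nat) : Int) = ((2 * pvTri al.toNat : Nat) : Int) from by
      push_cast; ring]
    rw [PySem.Int.mod_natCast]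
    set rN := t % (2 * pvTri al.toNat) with hrN
    have hrlt : rN < 2 * pvTri al.toNat := Nat.mod_lt _ (by omega)
    by_cases hcase : rN < pvTri al.toNat
    · -- ascending half
      rw [if_pos (by exact_mod_cast Int.ofNat_lt.mpr hcase)]
      rw [List.getD_append _ _ _ _ (by rw [pvBlocksUp_length]; omega)]
      have h := pvUp_getD al al.toNat (al.toNat + 1) (by omega) 0 rN hcase
      rw [show ((al.toNat : Nat) : Int) = al from by omega] at h
      rw [h]
      congr 1
      omega
    · -- descending half
      rw [if_neg (by omega)]
      rw [List.getD_append_right _ _ _ _ (by rw [pvBlocksUp_length]; omega)]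
      rw [show rN - (pvBlocksUp al al.toNat 0).length = rN - pvTri al.toNat from by
        rw [pvBlocksUp_length]]
      have h := pvDown_getD al al.toNat (al.toNat + 1) (by omega) (al - 1)
        (rN - pvTri al.toNat) (by omega)
      rw [show ((al.toNat : Nat) : Int) = al from by omega] at h
      rw [show ((rN - pvTri al.toNat : Nat) : Int) = (rN : Int) - ((pvTri al.toNat : Nat) : Int) from by
        omega] at h
      rw [h]
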